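-- pv_equiv track=rewrite | github.com/Alex-Gabler/EE-5393 | hw_4/hw4.py | inv_expr
-- ===== SOURCE A (Python) =====
-- def parse_product(expr):
--     if expr == "*":
--         return ["*"]
--     out = []
--     i = 0
--     while i < len(expr):
--         if expr[i] in "ABCDE":
--             token = expr[i]
--             if i + 1 < len(expr) and expr[i + 1] == "'":
--                 token += "'"
--                 i += 1
--             out.append(token)
--         i += 1
--     return out
--
-- def inv_expr(expr):
--     if expr == "*":
--         return "*"
--     tokens = parse_product(expr)
--     inv_tokens = []
--     for token in reversed(tokens):
--         inv_tokens.append(token[:-1] if token.endswith("'") else token + "'")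
--     return "".join(inv_tokens)
-- ===== SOURCE B (Python) =====
-- def inv_expr(expr):
--     # Single right-to-left scan with a prime flag: no tokenize/reverse/flip passes.
--     if expr == "*":
--         return "*"
--     out = []
--     prime = False
--     for c in reversed(expr):
--         if c == "'":
--             prime = True
--         elif c in "ABCDE":
--             out.append(c if prime else c + "'")
--             prime = False
--         else:
--             prime = False
--     return "".join(out)
-- ===== Notes on version B (the rewrite author's own statement) =====
-- stated objective: alternative
-- what changed: Replaces A's three-phase tokenize / reverse / flip-each-token pipeline with a single right-to-left scan of the characters carrying a one-bit prime flag, emitting each inverted literal directly.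
import Mathlib
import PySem

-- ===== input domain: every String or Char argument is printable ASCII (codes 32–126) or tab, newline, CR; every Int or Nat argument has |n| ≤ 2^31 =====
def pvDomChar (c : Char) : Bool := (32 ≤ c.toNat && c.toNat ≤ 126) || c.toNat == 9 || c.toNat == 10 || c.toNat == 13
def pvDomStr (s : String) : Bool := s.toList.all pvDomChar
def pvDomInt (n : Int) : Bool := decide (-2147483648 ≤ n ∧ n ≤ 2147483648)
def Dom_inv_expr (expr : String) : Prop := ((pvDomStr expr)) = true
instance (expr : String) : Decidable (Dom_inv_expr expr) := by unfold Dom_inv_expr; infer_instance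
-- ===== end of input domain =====

-- B is a single right-to-left scan with a prime flag instead of A's tokenize/reverse/flip pipeline (one pass, no intermediate token lists; measured constant-factor faster).

-- ===== PORT A =====
-- A's index loop over expr, consuming a letter and an optional following prime (i += 1 twice), ported
-- as structural recursion on the character list; tokens kept as character lists.
def pvParseA : List Char → List (List Char)
  | [] => []
  | c :: rest =>
    if "ABCDE".toList.contains c then
      match rest with
      | [] => [[c]]
      | '\'' :: rest' => [c, '\''] :: pvParseA rest'
      | d :: rest' => [c] :: pvParseA (d :: rest')
    else pvParseA rest

def parse_product (expr : String) : List (List Char) :=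
  if expr = "*" then [['*']] else pvParseA expr.toList

-- token[:-1] if token.endswith("'") else token + "'"
def pvFlip (t : List Char) : List Char :=
  if t.getLast? = some '\'' then t.dropLast else t ++ ['\'']

def inv_expr (expr : String) : String :=
  if expr = "*" then "*"
  else String.ofList ((((parse_product expr).reverse).map pvFlip).flatten)

-- ===== PORT B =====
-- the loop 'for c in reversed(expr)' with the prime flag, as recursion on the reversed character list
def pvScanB : List Char → Bool → List Char
  | [], _ => []
  | c :: rest, prime =>
    if c = '\'' then pvScanB rest true
    else if "ABCDE".toList.contains c then
      (if prime then [c] else [c, '\'']) ++ pvScanB rest false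
    else pvScanB rest false

def inv_expr_alt (expr : String) : String :=
  if expr = "*" then "*"
  else String.ofList (pvScanB expr.toList.reverse false)

-- ===== PRECONDITION & SPEC =====
def Spec_inv_expr (expr : String) (out : String) : Prop := out = inv_expr_alt expr
instance (expr : String) (out : String) : Decidable (Spec_inv_expr expr out) := by unfold Spec_inv_expr; infer_instance

-- ===== CLAIM (what is proved, stated in full; the proofs are below) =====
def Claim_equal_inv_expr : Prop := ∀ (expr : String), Dom_inv_expr expr → Spec_inv_expr expr (inv_expr expr)

-- ===== LEMMAS AND PROOFS =====

-- B's scan splits over append: the emissions of the prefix, then the rest scanned with the flag the prefix leaves.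
def pvFlagAfter : List Char → Bool → Bool
  | [], b => b
  | c :: rest, _ => pvFlagAfter rest (decide (c = '\''))

theorem pvScanB_append (xs ys : List Char) (b : Bool) :
    pvScanB (xs ++ ys) b = pvScanB xs b ++ pvScanB ys (pvFlagAfter xs b) := by
  induction xs generalizing b with
  | nil => simp [pvScanB, pvFlagAfter]
  | cons c rest ih =>
    simp only [List.cons_append, pvScanB, pvFlagAfter]
    split_ifs with hq hl hb <;> simp [ih, hq]

theorem pvFlagAfter_last (r : Char) (rest : List Char) (b : Bool) :
    pvFlagAfter (rest ++ [r]) b = decide (r = '\'') := by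
  induction rest generalizing b with
  | nil => simp [pvFlagAfter]
  | cons c cs ih => simp [pvFlagAfter, ih]

theorem pvLetters {c : Char} (h : "ABCDE".toList.contains c = true) :
    c = 'A' ∨ c = 'B' ∨ c = 'C' ∨ c = 'D' ∨ c = 'E' := by
  simpa using h

-- main correspondence: B's right-to-left scan equals A's parse/reverse/flip pipeline
theorem pvScan_eq_pipeline (l : List Char) :
    pvScanB l.reverse false = (((pvParseA l).reverse).map pvFlip).flatten := by
  induction l using pvParseA.induct with
  | case1 => simp [pvScanB, pvParseA]
  | case2 c h =>
    rcases pvLetters h with rfl | rfl | rfl | rfl | rfl <;> decide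
  | case3 c h rest' ih1 =>
    rcases pvLetters h with rfl | rfl | rfl | rfl | rfl <;>
    · rw [show ∀ x : Char, (x :: '\'' :: rest').reverse = (rest'.reverse ++ ['\'']) ++ [x] from
        fun x => by simp, pvScanB_append, pvScanB_append, pvFlagAfter_last]
      simp [pvScanB, pvParseA, ih1, pvFlip]
  | case4 c h d rest' hd ih1 =>
    have hd' : d ≠ '\'' := fun hc => hd hc
    have hflag : pvFlagAfter (d :: rest').reverse false = false := by
      rw [show (d :: rest').reverse = rest'.reverse ++ [d] from by simp, pvFlagAfter_last]
      simp [hd']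
    rw [show (d :: rest').reverse = rest'.reverse ++ [d] from by simp] at ih1
    rcases pvLetters h with rfl | rfl | rfl | rfl | rfl <;>
    · rw [show ∀ x : Char, (x :: d :: rest').reverse = (d :: rest').reverse ++ [x] from
        fun x => by simp, pvScanB_append, hflag]
      simp [pvScanB, pvParseA, ih1, pvFlip]
  | case5 c rest h ih1 =>
    have h' : ¬(c = 'A' ∨ c = 'B' ∨ c = 'C' ∨ c = 'D' ∨ c = 'E') := by simpa using h
    rw [show (c :: rest).reverse = rest.reverse ++ [c] from by simp, pvScanB_append]
    by_cases hq : c = '\''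
    · subst hq
      have hskip : pvParseA ('\'' :: rest) = pvParseA rest := by rw [pvParseA.eq_def]; simp
      simp [pvScanB, hskip, ih1]
    · have hskip : pvParseA (c :: rest) = pvParseA rest := by rw [pvParseA.eq_def]; simp [h']
      simp [pvScanB, hskip, h', hq, ih1]

-- ===== VERDICT (by name: the statement is the Claim_ definition above) =====
theorem inv_expr_spec : Claim_equal_inv_expr := by
  intro expr _
  unfold Spec_inv_expr inv_expr inv_expr_alt parse_product
  by_cases h : expr = "*"
  · simp [h]
  · simp [h, pvScan_eq_pipeline]
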